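-- pv_equiv track=rewrite | github.com/ninjra/statistics_harness | src/statistic_harness/core/reporting/manifest.py | _downstream_consumers
-- ===== SOURCE A (Python) =====
-- from collections import deque
-- from typing import Any
--
-- def _downstream_consumers(plugin_ids: set[str], manifest_index: dict[str, dict[str, Any]]) -> dict[str, list[str]]:
--     reverse: dict[str, set[str]] = {pid: set() for pid in plugin_ids}
--     for pid in plugin_ids:
--         meta = manifest_index.get(pid) or {}
--         deps = meta.get("depends_on") if isinstance(meta.get("depends_on"), list) else []
--         for dep in deps:
--             dep_id = str(dep or "").strip()
--             if dep_id and dep_id in reverse: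
--                 reverse[dep_id].add(pid)
--     out: dict[str, list[str]] = {}
--     for pid in sorted(plugin_ids):
--         seen: set[str] = set()
--         queue: deque[str] = deque(sorted(reverse.get(pid) or []))
--         while queue:
--             cur = queue.popleft()
--             if cur in seen:
--                 continue
--             seen.add(cur)
--             for nxt in sorted(reverse.get(cur) or []):
--                 if nxt not in seen:
--                     queue.append(nxt)
--         out[pid] = sorted(seen)
--     return out
-- ===== SOURCE B (Python) =====
-- def _downstream_consumers(plugin_ids: "set[str]", manifest_index: "dict[str, dict]") -> "dict[str, list[str]]":
--     # Same reverse-graph construction as the original.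
--     reverse: "dict[str, set[str]]" = {pid: set() for pid in plugin_ids}
--     for pid in plugin_ids:
--         meta = manifest_index.get(pid) or {}
--         deps = meta.get("depends_on") if isinstance(meta.get("depends_on"), list) else []
--         for dep in deps:
--             dep_id = str(dep or "").strip()
--             if dep_id and dep_id in reverse:
--                 reverse[dep_id].add(pid)
--     # Transitive closure by level saturation instead of per-node BFS:
--     # grow the neighbour set n times; after n = |plugin_ids| rounds it is the
--     # full (>= 1 step) reachable set.
--     n = len(plugin_ids)
--     out: "dict[str, list[str]]" = {}
--     for pid in sorted(plugin_ids):
--         s = set(reverse[pid])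
--         for _ in range(n):
--             grown = set(s)
--             for v in s:
--                 grown |= reverse[v]
--             if len(grown) == len(s):
--                 break
--             s = grown
--         out[pid] = sorted(s)
--     return out
-- ===== Notes on version B (the rewrite author's own statement) =====
-- stated objective: alternative
-- what changed: Replaces the per-node BFS with explicit queue and visited set by an iterated level-saturation: each node's neighbour set is grown n times by unioning in the reverse-neighbours of its members, which reaches the same (>=1 step) transitive closure without any queue or visited bookkeeping.
import Mathlib
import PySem

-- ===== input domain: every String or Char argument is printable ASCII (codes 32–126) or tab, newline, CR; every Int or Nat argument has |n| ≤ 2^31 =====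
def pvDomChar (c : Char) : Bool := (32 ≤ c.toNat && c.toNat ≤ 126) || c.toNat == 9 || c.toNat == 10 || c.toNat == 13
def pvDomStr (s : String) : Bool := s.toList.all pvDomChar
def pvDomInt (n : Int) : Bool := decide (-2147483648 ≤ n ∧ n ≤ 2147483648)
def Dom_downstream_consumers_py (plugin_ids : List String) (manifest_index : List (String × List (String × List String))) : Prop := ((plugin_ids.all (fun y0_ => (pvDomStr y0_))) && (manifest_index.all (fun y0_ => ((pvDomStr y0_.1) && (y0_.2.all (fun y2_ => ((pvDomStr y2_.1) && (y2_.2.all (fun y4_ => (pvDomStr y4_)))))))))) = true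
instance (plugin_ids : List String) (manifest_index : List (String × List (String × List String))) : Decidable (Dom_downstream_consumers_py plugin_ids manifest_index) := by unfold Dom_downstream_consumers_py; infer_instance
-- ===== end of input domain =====

-- B replaces A's per-node BFS (queue + visited set) by an n-fold level-saturation of each
-- node's reverse-neighbour set; same reverse-graph build, same return value (alternative
-- decomposition, not claimed faster).


-- ===== PORT A =====
-- shared by both ports: the Pythons build the reverse-dependency graph with the very same lines
-- reverse = {pid: set() for pid in plugin_ids}; then for pid: for dep in deps: reverse[dep_id].add(pid)
def pvBuildReverse (plugin_ids : List String)
    (manifest_index : List (String × List (String × List String))) :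
    PySem.Dict String (PySem.Set String) :=
  let reverse0 : PySem.Dict String (PySem.Set String) :=
    plugin_ids.foldl (fun d pid => d.insert pid PySem.Set.empty) PySem.Dict.empty
  plugin_ids.foldl (fun d pid =>
    -- meta = manifest_index.get(pid) or {}; deps = meta.get("depends_on") if isinstance(..., list) else []
    let mta : PySem.Dict String (List String) :=
      PySem.Dict.mk ((PySem.Dict.mk manifest_index).getD pid [])
    let deps := (mta.get? "depends_on").getD []
    deps.foldl (fun d dep =>
      let dep_id := PySem.Str.strip dep          -- str(dep or "").strip() = dep.strip() for a str dep
      if dep_id ≠ "" ∧ d.contains dep_id = true then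
        d.modify dep_id PySem.Set.empty (fun s => PySem.Set.add s pid)
      else d) d) reverse0

-- A's while-queue BFS; fuel only makes the recursion total, it is provably never exhausted
-- for the fuel A's port supplies (pvBfs_spec below).
def pvBfs (reverse : PySem.Dict String (PySem.Set String)) :
    Nat → PySem.Set String → List String → PySem.Set String
  | 0, seen, _ => seen
  | _ + 1, seen, [] => seen
  | fuel + 1, seen, cur :: rest =>
    if cur ∈ seen then pvBfs reverse fuel seen rest
    else
      let seen' := PySem.Set.add seen cur
      pvBfs reverse fuel seen'
        (rest ++ (PySem.List.sorted (reverse.getD cur PySem.Set.empty) (fun x => x) false).filter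
          (fun nxt => !(decide (nxt ∈ seen'))))

def downstream_consumers_py (plugin_ids : List String)
    (manifest_index : List (String × List (String × List String))) : List (String × List String) :=
  let reverse := pvBuildReverse plugin_ids manifest_index
  let fuel := plugin_ids.length * plugin_ids.length + 2 * plugin_ids.length + 1
  let out : PySem.Dict String (List String) :=
    (PySem.List.sorted plugin_ids (fun x => x) false).foldl (fun out pid =>
      let seen := pvBfs reverse fuel PySem.Set.empty
        (PySem.List.sorted (reverse.getD pid PySem.Set.empty) (fun x => x) false)
      out.insert pid (PySem.List.sorted seen (fun x => x) false)) PySem.Dict.empty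
  out.items

-- ===== PORT B =====
-- one saturation round: grown = set(s); for v in s: grown |= reverse[v]
def pvGrow (reverse : PySem.Dict String (PySem.Set String)) (s : PySem.Set String) :
    PySem.Set String :=
  s.foldl (fun grown v => PySem.Set.update grown (reverse.getD v PySem.Set.empty)) s

-- for _ in range(k): grown = grow(s); if len(grown) == len(s): break; s = grown
def pvSat (reverse : PySem.Dict String (PySem.Set String)) :
    Nat → PySem.Set String → PySem.Set String
  | 0, s => s
  | k + 1, s =>
    let grown := pvGrow reverse s
    if grown.length = s.length then s else pvSat reverse k grown

def downstream_consumers_py_alt (plugin_ids : List String)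
    (manifest_index : List (String × List (String × List String))) : List (String × List String) :=
  let reverse := pvBuildReverse plugin_ids manifest_index
  let n := plugin_ids.length
  let out : PySem.Dict String (List String) :=
    (PySem.List.sorted plugin_ids (fun x => x) false).foldl (fun out pid =>
      out.insert pid (PySem.List.sorted
        (pvSat reverse n (reverse.getD pid PySem.Set.empty)) (fun x => x) false)) PySem.Dict.empty
  out.items

-- ===== PRECONDITION & SPEC =====
def Spec_downstream_consumers_py (plugin_ids : List String) (manifest_index : List (String × List (String × List String))) (out : List (String × List String)) : Prop := out = downstream_consumers_py_alt plugin_ids manifest_index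
instance (plugin_ids : List String) (manifest_index : List (String × List (String × List String))) (out : List (String × List String)) : Decidable (Spec_downstream_consumers_py plugin_ids manifest_index out) := by unfold Spec_downstream_consumers_py; infer_instance

-- ===== CLAIM (what is proved, stated in full; the proofs are below) =====
def Claim_equal_downstream_consumers_py : Prop := ∀ (plugin_ids : List String) (manifest_index : List (String × List (String × List String))), Dom_downstream_consumers_py plugin_ids manifest_index → Spec_downstream_consumers_py plugin_ids manifest_index (downstream_consumers_py plugin_ids manifest_index)

-- ===== LEMMAS AND PROOFS =====

-- adjacency and avoiding-set reachability used to characterise both loops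
def adjOf (reverse : PySem.Dict String (PySem.Set String)) (v : String) : List String :=
  reverse.getD v PySem.Set.empty

def Avoid (reverse : PySem.Dict String (PySem.Set String)) (S : List String)
    (x y : String) : Prop :=
  Relation.ReflTransGen (fun u v => v ∈ adjOf reverse u ∧ v ∉ S) x y

lemma avoid_mono (reverse : PySem.Dict String (PySem.Set String)) {S : List String}
    {cur x y : String} (h : Avoid reverse (S ++ [cur]) x y) : Avoid reverse S x y := by
  refine Relation.ReflTransGen.mono ?_ h
  intro u v ⟨h1, h2⟩
  exact ⟨h1, fun hv => h2 (by simp [hv])⟩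

-- a path avoiding S from an unseen start either ends at cur or factors through a
-- start that also avoids cur (the key step for popping cur off the BFS queue)
lemma avoid_insert (reverse : PySem.Dict String (PySem.Set String)) {S : List String}
    {cur x y : String} (hx : x ∉ S) (h : Avoid reverse S x y) :
    y = cur ∨ ∃ x', x' ∉ S ∧ x' ≠ cur ∧ (x' = x ∨ x' ∈ adjOf reverse cur) ∧
      Avoid reverse (S ++ [cur]) x' y := by
  unfold Avoid at h
  revert hx
  induction h using Relation.ReflTransGen.head_induction_on with
  | refl =>
    intro hyS
    by_cases hyc : y = cur
    · exact Or.inl hyc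
    · exact Or.inr ⟨y, hyS, hyc, Or.inl rfl, Relation.ReflTransGen.refl⟩
  | head h' hrt ih =>
    rename_i a c
    intro haS
    rcases ih h'.2 with hyc | ⟨x', hx'S, hx'c, hor, hpath⟩
    · exact Or.inl hyc
    · rcases hor with rfl | hmem
      · by_cases hac : a = cur
        · exact Or.inr ⟨x', hx'S, hx'c, Or.inr (hac ▸ h'.1), hpath⟩
        · refine Or.inr ⟨a, haS, hac, Or.inl rfl, Relation.ReflTransGen.head ⟨h'.1, ?_⟩ hpath⟩
          simp [hx'S, hx'c]
      · exact Or.inr ⟨x', hx'S, hx'c, Or.inr hmem, hpath⟩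

lemma avoid_pop (reverse : PySem.Dict String (PySem.Set String)) {S : List String}
    {cur y : String} (hcur : cur ∉ S) {rest q' : List String}
    (hq' : ∀ x, x ∈ q' ↔ x ∈ rest ∨ (x ∈ adjOf reverse cur ∧ x ∉ S ∧ x ≠ cur)) :
    (y ∈ S ++ [cur] ∨ ∃ x ∈ q', x ∉ S ++ [cur] ∧ Avoid reverse (S ++ [cur]) x y) ↔
    (y ∈ S ∨ ∃ x ∈ cur :: rest, x ∉ S ∧ Avoid reverse S x y) := by
  constructor
  · rintro (hyS | ⟨x, hxq, hxS, hpath⟩)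
    · rcases List.mem_append.mp hyS with hyS | hyc
      · exact Or.inl hyS
      · refine Or.inr ⟨cur, List.mem_cons_self, hcur, ?_⟩
        simp only [List.mem_singleton] at hyc
        exact hyc ▸ Relation.ReflTransGen.refl
    · have hxS0 : x ∉ S := fun h => hxS (by simp [h])
      have hpath0 : Avoid reverse S x y := avoid_mono reverse hpath
      rcases (hq' x).mp hxq with hxr | ⟨hxadj, hxS', hxcur⟩
      · exact Or.inr ⟨x, List.mem_cons_of_mem _ hxr, hxS0, hpath0⟩
      · exact Or.inr ⟨cur, List.mem_cons_self, hcur,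
          Relation.ReflTransGen.head ⟨hxadj, hxS'⟩ hpath0⟩
  · rintro (hyS | ⟨x, hxq, hxS, hpath⟩)
    · exact Or.inl (by simp [hyS])
    · rcases avoid_insert reverse (cur := cur) hxS hpath with hyc | ⟨x', hx'S, hx'c, hor, hpath'⟩
      · exact Or.inl (by simp [hyc])
      · have hx'S' : x' ∉ S ++ [cur] := by simp [hx'S, hx'c]
        rcases hor with rfl | hmem
        · rcases List.mem_cons.mp hxq with rfl | hxr
          · exact absurd rfl hx'c
          · exact Or.inr ⟨x', (hq' x').mpr (Or.inl hxr), hx'S', hpath'⟩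
        · exact Or.inr ⟨x', (hq' x').mpr (Or.inr ⟨hmem, hx'S, hx'c⟩), hx'S', hpath'⟩

-- the filtered-universe measure drops when a fresh node is added to seen
lemma filter_len_succ {K S : List String} {cur : String} (hK : K.Nodup)
    (hcK : cur ∈ K) (hcS : cur ∉ S) :
    (K.filter (fun v => !decide (v ∈ S ++ [cur]))).length + 1 =
    (K.filter (fun v => !decide (v ∈ S))).length := by
  induction K with
  | nil => simp at hcK
  | cons a K ih =>
    have haK : a ∉ K := (List.nodup_cons.mp hK).1
    have hKn : K.Nodup := (List.nodup_cons.mp hK).2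
    rcases List.mem_cons.mp hcK with rfl | hcK'
    · have h1 : List.filter (fun v => !decide (v ∈ S ++ [cur])) K =
          List.filter (fun v => !decide (v ∈ S)) K := by
        apply List.filter_congr
        intro v hv
        have hvc : v ≠ cur := fun h => haK (h ▸ hv)
        simp [List.mem_append, hvc]
      rw [List.filter_cons_of_neg (by simp), List.filter_cons_of_pos (by simp [hcS]), h1]
      simp
    · have hac : a ≠ cur := fun h => haK (h ▸ hcK')
      by_cases haS : a ∈ S
      · rw [List.filter_cons_of_neg (by simp [List.mem_append, haS]),
            List.filter_cons_of_neg (by simp [haS])]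
        exact ih hKn hcK'
      · rw [List.filter_cons_of_pos (by simp [List.mem_append, haS, hac]),
            List.filter_cons_of_pos (by simp [haS])]
        simp only [List.length_cons]
        have := ih hKn hcK'
        omega

lemma pvBfs_spec (reverse : PySem.Dict String (PySem.Set String))
    (HK : reverse.keys.Nodup)
    (HN : ∀ v, (adjOf reverse v).Nodup)
    (HS : ∀ v w, w ∈ adjOf reverse v → w ∈ reverse.keys) :
    ∀ (fuel : Nat) (seen : PySem.Set String) (queue : List String),
      seen.Nodup → (∀ x ∈ queue, x ∈ reverse.keys) →
      (reverse.keys.filter (fun v => !decide (v ∈ seen))).length * (reverse.keys.length + 1)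
        + queue.length ≤ fuel →
      (pvBfs reverse fuel seen queue).Nodup ∧
      ∀ y, y ∈ pvBfs reverse fuel seen queue ↔
        y ∈ seen ∨ ∃ x ∈ queue, x ∉ seen ∧ Avoid reverse seen x y := by
  intro fuel
  induction fuel with
  | zero =>
    intro seen queue hsn hq hφ
    have hq0 : queue = [] := by
      cases queue with
      | nil => rfl
      | cons a t => simp at hφ
    subst hq0
    simp [pvBfs, hsn]
  | succ fuel ih =>
    intro seen queue hsn hq hφ
    match queue with
    | [] => simp [pvBfs, hsn]
    | cur :: rest =>
      by_cases hc : cur ∈ seen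
      · have hrec := ih seen rest hsn (fun x hx => hq x (List.mem_cons_of_mem _ hx))
          (by simp [List.length_cons] at hφ; omega)
        rw [show pvBfs reverse (fuel + 1) seen (cur :: rest) = pvBfs reverse fuel seen rest by
          simp only [pvBfs]; rw [if_pos hc]]
        refine ⟨hrec.1, fun y => ?_⟩
        rw [hrec.2 y]
        constructor
        · rintro (h | ⟨x, hx, hxs, hp⟩)
          · exact Or.inl h
          · exact Or.inr ⟨x, List.mem_cons_of_mem _ hx, hxs, hp⟩
        · rintro (h | ⟨x, hx, hxs, hp⟩)
          · exact Or.inl h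
          · rcases List.mem_cons.mp hx with rfl | hx'
            · exact absurd hc hxs
            · exact Or.inr ⟨x, hx', hxs, hp⟩
      · have hcurK : cur ∈ reverse.keys := hq cur List.mem_cons_self
        have hadd : PySem.Set.add seen cur = seen ++ [cur] := PySem.Set.add_of_not_mem hc
        have hsn' : (seen ++ [cur]).Nodup := by
          rw [← hadd]
          exact PySem.Set.nodup_add seen cur hsn
        set q' : List String := rest ++
          (PySem.List.sorted (reverse.getD cur PySem.Set.empty) (fun x => x) false).filter
            (fun nxt => !(decide (nxt ∈ PySem.Set.add seen cur))) with hq'def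
        have hstep : pvBfs reverse (fuel + 1) seen (cur :: rest) =
            pvBfs reverse fuel (PySem.Set.add seen cur) q' := by
          simp only [pvBfs]; rw [if_neg hc]
        have hq'mem : ∀ x, x ∈ q' ↔
            x ∈ rest ∨ (x ∈ adjOf reverse cur ∧ x ∉ seen ∧ x ≠ cur) := by
          intro x
          simp only [hq'def, List.mem_append, List.mem_filter, PySem.List.mem_sorted,
            hadd, Bool.not_eq_eq_eq_not, Bool.not_true, decide_eq_false_iff_not,
            List.mem_append, List.mem_singleton, adjOf]
          constructor
          · rintro (h | ⟨h1, h2⟩)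
            · exact Or.inl h
            · exact Or.inr ⟨h1, fun hs => h2 (Or.inl hs), fun hc' => h2 (Or.inr hc')⟩
          · rintro (h | ⟨h1, h2, h3⟩)
            · exact Or.inl h
            · exact Or.inr ⟨h1, by rintro (hs | hc') <;> [exact h2 hs; exact h3 hc']⟩
        have hq'K : ∀ x ∈ q', x ∈ reverse.keys := by
          intro x hx
          rcases (hq'mem x).mp hx with h | ⟨h, _, _⟩
          · exact hq x (List.mem_cons_of_mem _ h)
          · exact HS cur x h
        have hadjlen : (adjOf reverse cur).length ≤ reverse.keys.length :=
          (List.subperm_of_subset (HN cur) (fun w hw => HS cur w hw)).length_le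
        have hfl : (reverse.keys.filter (fun v => !decide (v ∈ seen ++ [cur]))).length + 1 =
            (reverse.keys.filter (fun v => !decide (v ∈ seen))).length :=
          filter_len_succ HK hcurK hc
        have hφ' : (reverse.keys.filter (fun v => !decide (v ∈ PySem.Set.add seen cur))).length *
            (reverse.keys.length + 1) + q'.length ≤ fuel := by
          rw [hadd]
          have hq'len : q'.length ≤ rest.length + reverse.keys.length := by
            have h1 := List.length_filter_le
              (fun nxt => !(decide (nxt ∈ PySem.Set.add seen cur)))
              (PySem.List.sorted (reverse.getD cur PySem.Set.empty) (fun x => x) false)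
            have h2 : (PySem.List.sorted (reverse.getD cur PySem.Set.empty)
                (fun x => x) false).length = (adjOf reverse cur).length := by
              simp [PySem.List.length_sorted, adjOf]
            simp only [hq'def, List.length_append]
            omega
          set a := (reverse.keys.filter (fun v => !decide (v ∈ seen ++ [cur]))).length with ha
          set k := reverse.keys.length with hk
          have hexp : (a + 1) * (k + 1) = a * (k + 1) + (k + 1) := by ring
          simp only [List.length_cons] at hφ
          rw [← hfl] at hφ
          omega
        have hrec := ih (PySem.Set.add seen cur) q' (hadd ▸ hsn') hq'K hφ'
        rw [hstep]
        refine ⟨hrec.1, fun y => ?_⟩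
        rw [hrec.2 y]
        rw [hadd] at *
        exact avoid_pop reverse hc hq'mem

-- ===== B side: membership of one saturation round =====
lemma foldl_update_mem (reverse : PySem.Dict String (PySem.Set String)) :
    ∀ (l acc : List String) (y : String),
      y ∈ l.foldl (fun g v => PySem.Set.update g (reverse.getD v PySem.Set.empty)) acc ↔
        y ∈ acc ∨ ∃ v ∈ l, y ∈ adjOf reverse v := by
  intro l
  induction l with
  | nil => simp
  | cons a l ih =>
    intro acc y
    rw [List.foldl_cons, ih, PySem.Set.mem_update]
    simp only [List.mem_cons, adjOf]
    constructor
    · rintro ((h | h) | ⟨v, hv, h⟩)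
      · exact Or.inl h
      · exact Or.inr ⟨a, Or.inl rfl, h⟩
      · exact Or.inr ⟨v, Or.inr hv, h⟩
    · rintro (h | ⟨v, rfl | hv, h⟩)
      · exact Or.inl (Or.inl h)
      · exact Or.inl (Or.inr h)
      · exact Or.inr ⟨v, hv, h⟩

lemma foldl_update_nodup (reverse : PySem.Dict String (PySem.Set String)) :
    ∀ (l acc : List String), acc.Nodup →
      (l.foldl (fun g v => PySem.Set.update g (reverse.getD v PySem.Set.empty)) acc).Nodup := by
  intro l
  induction l with
  | nil => intro acc h; exact h
  | cons a l ih =>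
    intro acc h
    exact ih _ (PySem.Set.nodup_update acc _ h)

lemma pvGrow_mem (reverse : PySem.Dict String (PySem.Set String)) (s : PySem.Set String)
    (y : String) :
    y ∈ pvGrow reverse s ↔ y ∈ s ∨ ∃ v ∈ s, y ∈ adjOf reverse v :=
  foldl_update_mem reverse s s y

lemma pvGrow_nodup (reverse : PySem.Dict String (PySem.Set String)) {s : PySem.Set String}
    (h : s.Nodup) : (pvGrow reverse s).Nodup :=
  foldl_update_nodup reverse s s h

lemma mem_pvGrow_of_mem (reverse : PySem.Dict String (PySem.Set String)) {s : PySem.Set String}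
    {y : String} (h : y ∈ s) : y ∈ pvGrow reverse s :=
  (pvGrow_mem reverse s y).mpr (Or.inl h)

lemma pvGrow_congr (reverse : PySem.Dict String (PySem.Set String)) {s t : PySem.Set String}
    (h : ∀ x, x ∈ s ↔ x ∈ t) (y : String) :
    y ∈ pvGrow reverse s ↔ y ∈ pvGrow reverse t := by
  rw [pvGrow_mem, pvGrow_mem]
  constructor
  · rintro (h1 | ⟨v, hv, h2⟩)
    · exact Or.inl ((h y).mp h1)
    · exact Or.inr ⟨v, (h v).mp hv, h2⟩
  · rintro (h1 | ⟨v, hv, h2⟩)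
    · exact Or.inl ((h y).mpr h1)
    · exact Or.inr ⟨v, (h v).mpr hv, h2⟩

lemma pvGrow_sub_keys (reverse : PySem.Dict String (PySem.Set String))
    (HS : ∀ v w, w ∈ adjOf reverse v → w ∈ reverse.keys) {s : PySem.Set String}
    (hs : ∀ x ∈ s, x ∈ reverse.keys) : ∀ x ∈ pvGrow reverse s, x ∈ reverse.keys := by
  intro x hx
  rcases (pvGrow_mem reverse s x).mp hx with h | ⟨v, hv, h⟩
  · exact hs x h
  · exact HS v x h

-- ===== B side: the iterated rounds =====
-- proof-side pure iteration (no early exit); pvSat computes the same members (pvSat_mem_iter)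
def pvIter (reverse : PySem.Dict String (PySem.Set String)) :
    Nat → PySem.Set String → PySem.Set String
  | 0, s => s
  | k + 1, s => pvIter reverse k (pvGrow reverse s)

lemma pvIter_succ (reverse : PySem.Dict String (PySem.Set String)) :
    ∀ (k : Nat) (s : PySem.Set String),
      pvIter reverse (k + 1) s = pvGrow reverse (pvIter reverse k s) := by
  intro k
  induction k with
  | zero => intro s; rfl
  | succ k ih =>
    intro s
    show pvIter reverse (k + 1) (pvGrow reverse s) = _
    rw [ih (pvGrow reverse s)]
    rfl

lemma pvIter_sub_keys (reverse : PySem.Dict String (PySem.Set String))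
    (HS : ∀ v w, w ∈ adjOf reverse v → w ∈ reverse.keys) :
    ∀ (k : Nat) {s : PySem.Set String}, (∀ x ∈ s, x ∈ reverse.keys) →
      ∀ x ∈ pvIter reverse k s, x ∈ reverse.keys := by
  intro k
  induction k with
  | zero => intro s h; exact h
  | succ k ih => intro s h; exact ih (pvGrow_sub_keys reverse HS h)

lemma mem_pvIter_of_mem (reverse : PySem.Dict String (PySem.Set String)) :
    ∀ (k : Nat) {s : PySem.Set String} {y : String}, y ∈ s → y ∈ pvIter reverse k s := by
  intro k
  induction k with
  | zero => intro s y h; exact h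
  | succ k ih => intro s y h; exact ih (mem_pvGrow_of_mem reverse h)

lemma pvIter_mono_k (reverse : PySem.Dict String (PySem.Set String)) (k : Nat)
    (s : PySem.Set String) {y : String} (h : y ∈ pvIter reverse k s) :
    y ∈ pvIter reverse (k + 1) s := by
  rw [pvIter_succ]
  exact mem_pvGrow_of_mem reverse h

lemma pvIter_sound (reverse : PySem.Dict String (PySem.Set String)) :
    ∀ (k : Nat) {s : PySem.Set String} {y : String}, y ∈ pvIter reverse k s →
      ∃ x ∈ s, Avoid reverse [] x y := by
  intro k
  induction k with
  | zero => intro s y h; exact ⟨y, h, Relation.ReflTransGen.refl⟩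
  | succ k ih =>
    intro s y h
    rcases ih h with ⟨x, hx, hp⟩
    rcases (pvGrow_mem reverse s x).mp hx with h1 | ⟨v, hv, h2⟩
    · exact ⟨x, h1, hp⟩
    · exact ⟨v, hv, Relation.ReflTransGen.head ⟨h2, by simp⟩ hp⟩

-- after |keys| rounds the saturation is closed under one more round
lemma pvIter_grow_stable (reverse : PySem.Dict String (PySem.Set String))
    (HK : reverse.keys.Nodup)
    (HS : ∀ v w, w ∈ adjOf reverse v → w ∈ reverse.keys)
    {s : PySem.Set String} {n : Nat}
    (hsub : ∀ x ∈ s, x ∈ reverse.keys) (hn : reverse.keys.length ≤ n) :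
    ∀ y, y ∈ pvGrow reverse (pvIter reverse n s) ↔ y ∈ pvIter reverse n s := by
  have key : ∀ k : Nat, (∀ y, y ∈ pvIter reverse (k + 1) s ↔ y ∈ pvIter reverse k s) ∨
      k + 1 ≤ (pvIter reverse (k + 1) s).toFinset.card := by
    intro k
    induction k with
    | zero =>
      by_cases hstab : ∀ y, y ∈ pvIter reverse 1 s ↔ y ∈ pvIter reverse 0 s
      · exact Or.inl hstab
      · have hwit : ∃ y, y ∈ pvIter reverse 1 s := by
          by_contra hno
          apply hstab
          intro y
          constructor
          · intro h
            exact absurd ⟨y, h⟩ hno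
          · exact fun h => pvIter_mono_k reverse 0 s h
        rcases hwit with ⟨y, hy1⟩
        refine Or.inr ?_
        exact Finset.card_pos.mpr ⟨y, List.mem_toFinset.mpr hy1⟩
    | succ k ih =>
      rcases ih with hstab | hcard
      · refine Or.inl ?_
        intro y
        rw [pvIter_succ reverse (k + 1) s]
        have h1 := pvGrow_congr reverse hstab y
        rw [← pvIter_succ reverse k s] at h1
        exact h1
      · by_cases hstab : ∀ y, y ∈ pvIter reverse (k + 2) s ↔ y ∈ pvIter reverse (k + 1) s
        · exact Or.inl hstab
        · have hwit : ∃ y, y ∈ pvIter reverse (k + 2) s ∧ y ∉ pvIter reverse (k + 1) s := by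
            by_contra hno
            apply hstab
            intro y
            constructor
            · intro h
              by_contra h1
              exact hno ⟨y, h, h1⟩
            · exact fun h => pvIter_mono_k reverse (k + 1) s h
          rcases hwit with ⟨y, hy2⟩
          refine Or.inr ?_
          have hss : (pvIter reverse (k + 1) s).toFinset ⊂ (pvIter reverse (k + 2) s).toFinset := by
            constructor
            · intro x hx
              exact List.mem_toFinset.mpr
                (pvIter_mono_k reverse (k + 1) s (List.mem_toFinset.mp hx))
            · intro hsub'
              exact hy2.2 (List.mem_toFinset.mp (hsub' (List.mem_toFinset.mpr hy2.1)))
          have := Finset.card_lt_card hss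
          have heq : k + 1 + 1 = k + 2 := rfl
          rw [heq]
          omega
  rcases key n with hstab | hcard
  · intro y
    rw [← pvIter_succ reverse n s]
    exact hstab y
  · exfalso
    have hsubK : (pvIter reverse (n + 1) s).toFinset ⊆ reverse.keys.toFinset := by
      intro x hx
      exact List.mem_toFinset.mpr
        (pvIter_sub_keys reverse HS (n + 1) hsub x (List.mem_toFinset.mp hx))
    have h1 := Finset.card_le_card hsubK
    have h2 : reverse.keys.toFinset.card = reverse.keys.length :=
      List.toFinset_card_of_nodup HK
    omega

lemma pvIter_complete (reverse : PySem.Dict String (PySem.Set String))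
    (HK : reverse.keys.Nodup)
    (HS : ∀ v w, w ∈ adjOf reverse v → w ∈ reverse.keys)
    {s : PySem.Set String} {n : Nat}
    (hsub : ∀ x ∈ s, x ∈ reverse.keys) (hn : reverse.keys.length ≤ n)
    {x y : String} (hx : x ∈ s) (hp : Avoid reverse [] x y) :
    y ∈ pvIter reverse n s := by
  unfold Avoid at hp
  induction hp with
  | refl => exact mem_pvIter_of_mem reverse n hx
  | tail hrt hstep ih =>
    rename_i b c
    exact (pvIter_grow_stable reverse HK HS hsub hn c).mp
      ((pvGrow_mem reverse _ c).mpr (Or.inr ⟨b, ih, hstep.1⟩))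


-- the early exit never changes the computed set: a stalled round is a fixed point
lemma pvGrow_eq_append (reverse : PySem.Dict String (PySem.Set String)) (s : PySem.Set String) :
    ∃ t, pvGrow reverse s = s ++ t := by
  have h : ∀ (l acc : List String), ∃ t,
      l.foldl (fun g v => PySem.Set.update g (reverse.getD v PySem.Set.empty)) acc = acc ++ t := by
    intro l
    induction l with
    | nil => intro acc; exact ⟨[], by simp⟩
    | cons a l ih =>
      intro acc
      rcases ih (PySem.Set.update acc (reverse.getD a PySem.Set.empty)) with ⟨t, ht⟩
      rw [List.foldl_cons, ht, PySem.Set.update_eq_append_filter, List.append_assoc]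
      exact ⟨_, rfl⟩
  exact h s s

lemma pvGrow_eq_of_length (reverse : PySem.Dict String (PySem.Set String))
    {s : PySem.Set String} (h : (pvGrow reverse s).length = s.length) :
    pvGrow reverse s = s := by
  rcases pvGrow_eq_append reverse s with ⟨t, ht⟩
  rw [ht] at h ⊢
  rw [List.length_append] at h
  have ht0 : t = [] := List.eq_nil_of_length_eq_zero (by omega)
  simp [ht0]

lemma pvIter_of_fixed (reverse : PySem.Dict String (PySem.Set String))
    {s : PySem.Set String} (h : pvGrow reverse s = s) :
    ∀ k, pvIter reverse k s = s := by
  intro k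
  induction k with
  | zero => rfl
  | succ k ih =>
    show pvIter reverse k (pvGrow reverse s) = s
    rw [h]
    exact ih

lemma pvSat_mem_iter (reverse : PySem.Dict String (PySem.Set String)) :
    ∀ (k : Nat) (s : PySem.Set String) (y : String),
      y ∈ pvSat reverse k s ↔ y ∈ pvIter reverse k s := by
  intro k
  induction k with
  | zero => intro s y; exact Iff.rfl
  | succ k ih =>
    intro s y
    show y ∈ (if (pvGrow reverse s).length = s.length then s
        else pvSat reverse k (pvGrow reverse s)) ↔ y ∈ pvIter reverse k (pvGrow reverse s)
    split
    · next h =>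
      have hfix := pvGrow_eq_of_length reverse h
      rw [hfix, pvIter_of_fixed reverse hfix k]
    · exact ih (pvGrow reverse s) y

lemma pvSat_nodup (reverse : PySem.Dict String (PySem.Set String)) :
    ∀ (k : Nat) {s : PySem.Set String}, s.Nodup → (pvSat reverse k s).Nodup := by
  intro k
  induction k with
  | zero => intro s h; exact h
  | succ k ih =>
    intro s h
    show (if (pvGrow reverse s).length = s.length then s
        else pvSat reverse k (pvGrow reverse s)).Nodup
    split
    · exact h
    · exact ih (pvGrow_nodup reverse h)

-- ===== facts about the shared reverse-graph build =====
lemma keys_foldl_const {α : Type}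
    (f : PySem.Dict String (PySem.Set String) → α → PySem.Dict String (PySem.Set String))
    (hf : ∀ d a, (f d a).keys = d.keys) :
    ∀ (l : List α) (d : PySem.Dict String (PySem.Set String)), (l.foldl f d).keys = d.keys := by
  intro l
  induction l with
  | nil => intro d; rfl
  | cons a l ih => intro d; rw [List.foldl_cons, ih, hf]

lemma keys_buildReverse (plugin_ids : List String)
    (manifest_index : List (String × List (String × List String))) :
    (pvBuildReverse plugin_ids manifest_index).keys = PySem.Set.ofList plugin_ids := by
  unfold pvBuildReverse
  rw [keys_foldl_const]
  · have h := PySem.Dict.keys_foldl_insert (ν := PySem.Set String) plugin_ids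
      (fun _ _ => PySem.Set.empty) PySem.Dict.empty
    simpa [PySem.Set.update_nil_left] using h
  · intro d pid
    apply keys_foldl_const
    intro d' dep
    dsimp only
    split
    · next hcond =>
      rw [PySem.Dict.keys_modify, PySem.Dict.keys_insert_of_contains]
      exact hcond.2
    · rfl

def InvRev (plugin_ids : List String) (d : PySem.Dict String (PySem.Set String)) : Prop :=
  ∀ v, (d.getD v PySem.Set.empty).Nodup ∧
    ∀ w ∈ d.getD v PySem.Set.empty, w ∈ plugin_ids

lemma invRev_empty (plugin_ids : List String) : InvRev plugin_ids PySem.Dict.empty := by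
  intro v
  rw [PySem.Dict.getD_empty]
  exact ⟨List.nodup_nil, by simp⟩

lemma invRev_insert_empty (plugin_ids : List String) :
    ∀ (l : List String) (d : PySem.Dict String (PySem.Set String)), InvRev plugin_ids d →
      InvRev plugin_ids (l.foldl (fun d pid => d.insert pid PySem.Set.empty) d) := by
  intro l
  induction l with
  | nil => intro d h; exact h
  | cons a l ih =>
    intro d h
    refine ih _ ?_
    intro v
    rw [PySem.Dict.getD_insert]
    split
    · exact ⟨List.nodup_nil, by simp [PySem.Set.empty]⟩
    · exact h v

lemma invRev_inner (plugin_ids : List String) {pid : String} (hpid : pid ∈ plugin_ids) :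
    ∀ (deps : List String) (d : PySem.Dict String (PySem.Set String)), InvRev plugin_ids d →
      InvRev plugin_ids (deps.foldl (fun d dep =>
        if PySem.Str.strip dep ≠ "" ∧ d.contains (PySem.Str.strip dep) = true then
          d.modify (PySem.Str.strip dep) PySem.Set.empty (fun s => PySem.Set.add s pid)
        else d) d) := by
  intro deps
  induction deps with
  | nil => intro d h; exact h
  | cons dep deps ih =>
    intro d h
    refine ih _ ?_
    dsimp only
    split
    · intro v
      rw [PySem.Dict.getD_modify]
      split
      · refine ⟨PySem.Set.nodup_add _ _ (h _).1, ?_⟩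
        intro w hw
        rw [PySem.Set.mem_add] at hw
        rcases hw with hw | rfl
        · exact (h _).2 w hw
        · exact hpid
      · exact h v
    · exact h

lemma invRev_buildReverse (plugin_ids : List String)
    (manifest_index : List (String × List (String × List String))) :
    InvRev plugin_ids (pvBuildReverse plugin_ids manifest_index) := by
  unfold pvBuildReverse
  have houter : ∀ (l : List String), (∀ p ∈ l, p ∈ plugin_ids) →
      ∀ d, InvRev plugin_ids d →
      InvRev plugin_ids (l.foldl (fun d pid =>
        (((PySem.Dict.mk ((PySem.Dict.mk manifest_index).getD pid [])).get? "depends_on").getD []).foldl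
          (fun d dep =>
            if PySem.Str.strip dep ≠ "" ∧ d.contains (PySem.Str.strip dep) = true then
              d.modify (PySem.Str.strip dep) PySem.Set.empty (fun s => PySem.Set.add s pid)
            else d) d) d) := by
    intro l
    induction l with
    | nil => intro _ d h; exact h
    | cons a l ih =>
      intro hmem d h
      refine ih (fun p hp => hmem p (List.mem_cons_of_mem _ hp)) _ ?_
      exact invRev_inner plugin_ids (hmem a List.mem_cons_self) _ d h
  exact houter plugin_ids (fun p hp => hp) _
    (invRev_insert_empty plugin_ids plugin_ids _ (invRev_empty plugin_ids))

-- ===== the per-plugin value computed by A equals the one computed by B =====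
lemma per_pid_eq (reverse : PySem.Dict String (PySem.Set String))
    (HK : reverse.keys.Nodup)
    (HN : ∀ v, (adjOf reverse v).Nodup)
    (HS : ∀ v w, w ∈ adjOf reverse v → w ∈ reverse.keys)
    {L : Nat} (hkL : reverse.keys.length ≤ L) (pid : String) :
    PySem.List.sorted (pvBfs reverse (L * L + 2 * L + 1) PySem.Set.empty
        (PySem.List.sorted (reverse.getD pid PySem.Set.empty) (fun x => x) false))
      (fun x => x) false =
    PySem.List.sorted (pvSat reverse L (reverse.getD pid PySem.Set.empty)) (fun x => x) false := by
  have hq0 : ∀ x ∈ PySem.List.sorted (reverse.getD pid PySem.Set.empty) (fun x => x) false,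
      x ∈ reverse.keys := by
    intro x hx
    exact HS pid x ((PySem.List.mem_sorted _ _ _ _).mp hx)
  have hφ : (reverse.keys.filter (fun v => !decide (v ∈ (PySem.Set.empty : PySem.Set String)))).length *
      (reverse.keys.length + 1) +
      (PySem.List.sorted (reverse.getD pid PySem.Set.empty) (fun x => x) false).length ≤
      L * L + 2 * L + 1 := by
    have h1 := List.length_filter_le (fun v => !decide (v ∈ (PySem.Set.empty : PySem.Set String)))
      reverse.keys
    have h2 : (PySem.List.sorted (reverse.getD pid PySem.Set.empty) (fun x => x) false).length ≤
        reverse.keys.length := by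
      rw [PySem.List.length_sorted]
      exact (List.subperm_of_subset (HN pid) (fun w hw => HS pid w hw)).length_le
    have h3 : reverse.keys.length * (reverse.keys.length + 1) ≤ L * (L + 1) :=
      Nat.mul_le_mul hkL (by omega)
    have h4 : (reverse.keys.filter (fun v => !decide (v ∈ (PySem.Set.empty : PySem.Set String)))).length *
        (reverse.keys.length + 1) ≤ reverse.keys.length * (reverse.keys.length + 1) :=
      Nat.mul_le_mul_right _ h1
    have h5 : L * (L + 1) = L * L + L := by ring
    omega
  obtain ⟨hndA, hmemA⟩ := pvBfs_spec reverse HK HN HS (L * L + 2 * L + 1) PySem.Set.empty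
    (PySem.List.sorted (reverse.getD pid PySem.Set.empty) (fun x => x) false)
    List.nodup_nil hq0 hφ
  have hndB : (pvSat reverse L (reverse.getD pid PySem.Set.empty)).Nodup :=
    pvSat_nodup reverse L (HN pid)
  rw [PySem.List.sorted_id_eq_sorted_id_iff_perm]
  rw [List.perm_ext_iff_of_nodup hndA hndB]
  intro y
  rw [hmemA y, pvSat_mem_iter reverse L _ y]
  constructor
  · rintro (h | ⟨x, hx, _, hp⟩)
    · exact absurd h (by simp [PySem.Set.empty])
    · exact pvIter_complete reverse HK HS (fun w hw => HS pid w hw) hkL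
        ((PySem.List.mem_sorted _ _ _ _).mp hx) hp
  · intro hy
    rcases pvIter_sound reverse L hy with ⟨x, hx, hp⟩
    exact Or.inr ⟨x, (PySem.List.mem_sorted _ _ _ _).mpr hx, by simp [PySem.Set.empty], hp⟩

-- ===== the two output folds agree key by key =====
lemma foldl_insert_congr (g h : String → List String) (hgh : ∀ x, g x = h x) :
    ∀ (l : List String) (d : PySem.Dict String (List String)),
      l.foldl (fun d x => d.insert x (g x)) d = l.foldl (fun d x => d.insert x (h x)) d := by
  intro l
  induction l with
  | nil => intro d; rfl
  | cons a l ih => intro d; rw [List.foldl_cons, List.foldl_cons, hgh a, ih]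

-- ===== VERDICT (by name: the statement is the Claim_ definition above) =====
theorem downstream_consumers_py_spec : Claim_equal_downstream_consumers_py := by
  unfold Claim_equal_downstream_consumers_py
  intro plugin_ids manifest_index _
  unfold Spec_downstream_consumers_py downstream_consumers_py downstream_consumers_py_alt
  dsimp only
  have hkeys := keys_buildReverse plugin_ids manifest_index
  have hinv := invRev_buildReverse plugin_ids manifest_index
  have HN : ∀ v, (adjOf (pvBuildReverse plugin_ids manifest_index) v).Nodup :=
    fun v => (hinv v).1
  have HS : ∀ v w, w ∈ adjOf (pvBuildReverse plugin_ids manifest_index) v →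
      w ∈ (pvBuildReverse plugin_ids manifest_index).keys := by
    intro v w hw
    rw [hkeys, PySem.Set.mem_ofList]
    exact (hinv v).2 w hw
  have HK : (pvBuildReverse plugin_ids manifest_index).keys.Nodup := by
    rw [hkeys]; exact PySem.Set.nodup_ofList _
  have hkL : (pvBuildReverse plugin_ids manifest_index).keys.length ≤ plugin_ids.length := by
    rw [hkeys]; exact PySem.Set.length_ofList_le _
  congr 1
  exact foldl_insert_congr _ _
    (fun pid => per_pid_eq (pvBuildReverse plugin_ids manifest_index) HK HN HS hkL pid) _ _
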